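-- pv_equiv track=rewrite | github.com/grazrib/gridbear | core/permissions/mcp_resolver.py | matches_permission
-- ===== SOURCE A (Python) =====
-- def matches_permission(server_name: str, allowed_servers: list[str]) -> bool:
--     """Check if server_name matches any permission in allowed_servers.
--
--     Supports:
--         - Exact match: "myserver" matches "myserver"
--         - Wildcard suffix: "mail-*" matches "mail-user@example.com"
--         - Wildcard all: "*" matches everything
--     """
--     for permission in allowed_servers:
--         if permission == "*":
--             return True
--         if permission.endswith("-*"):
--             prefix = permission[:-1]  # "gmail-*" -> "gmail-"
--             if server_name.startswith(prefix):
--                 return True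
--         elif permission == server_name:
--             return True
--     return False
-- ===== SOURCE B (Python) =====
-- def matches_permission(server_name: str, allowed_servers: list[str]) -> bool:
--     """Check if server_name matches any permission in allowed_servers.
--
--     Inverted strategy: index the patterns in a set once, then scan the
--     *server name*: exact/'*' matches are single set lookups, and every
--     '-'-terminated prefix of server_name is probed (prefix + '*') against
--     the set, which is exactly when some 'xxx-*' pattern matches.
--     """
--     patterns = set(allowed_servers)
--     if "*" in patterns or server_name in patterns:
--         return True
--     prefix = ""
--     for ch in server_name:
--         prefix += ch
--         if ch == "-" and prefix + "*" in patterns: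
--             return True
--     return False
-- ===== Notes on version B (the rewrite author's own statement) =====
-- stated objective: alternative
-- what changed: Inverts the traversal: instead of classifying each pattern in one loop, B indexes allowed_servers in a set once and scans server_name's characters, doing O(1) set lookups for '*', the exact name, and each '-'-terminated prefix plus '*' (correct because a 'xxx-*' pattern matches exactly when some '-'-ending prefix of the name equals 'xxx-').
import Mathlib
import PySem

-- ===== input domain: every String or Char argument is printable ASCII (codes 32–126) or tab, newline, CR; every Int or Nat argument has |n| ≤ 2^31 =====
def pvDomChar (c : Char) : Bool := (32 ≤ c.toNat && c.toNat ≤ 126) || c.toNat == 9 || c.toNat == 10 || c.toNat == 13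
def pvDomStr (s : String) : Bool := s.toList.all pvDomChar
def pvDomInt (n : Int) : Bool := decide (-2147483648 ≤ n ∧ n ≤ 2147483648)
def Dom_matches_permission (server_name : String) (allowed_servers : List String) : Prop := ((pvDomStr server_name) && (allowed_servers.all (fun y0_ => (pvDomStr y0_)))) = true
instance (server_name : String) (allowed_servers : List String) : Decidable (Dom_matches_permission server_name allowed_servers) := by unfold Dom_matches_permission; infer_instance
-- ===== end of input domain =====

-- B inverts the traversal: it indexes allowed_servers as a set once and scans server_name's
-- characters, probing each '-'-terminated prefix plus '*' against the set (alternative; same result).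


-- ===== PORT A =====
-- A's for-loop with early returns, as structural recursion over the pattern list.
def matchesLoopA (server_name : String) : List String → Bool
  | [] => false
  | permission :: rest =>
    if permission = "*" then true
    else if PySem.Str.endswith permission "-*" = true then
      if PySem.Str.startswith server_name (PySem.Str.slice permission none (some (-1))) = true then
        true
      else matchesLoopA server_name rest
    else if permission = server_name then true
    else matchesLoopA server_name rest

def matches_permission (server_name : String) (allowed_servers : List String) : Bool :=
  matchesLoopA server_name allowed_servers

-- ===== PORT B =====
-- Source B's 'for ch in server_name' loop: 'prefix' is tracked as its character list
-- (prefix += ch is an append; prefix + "*" in patterns is the set lookup, exact via String.ofList).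
def prefixLoopB (patterns : PySem.Set String) : List Char → List Char → Bool
  | _, [] => false
  | pre, ch :: rest =>
    let pre' := pre ++ [ch]
    if ch = '-' && PySem.Set.contains patterns (String.ofList (pre' ++ ['*'])) then true
    else prefixLoopB patterns pre' rest

def matches_permission_alt (server_name : String) (allowed_servers : List String) : Bool :=
  let patterns := PySem.Set.ofList allowed_servers
  if PySem.Set.contains patterns "*" || PySem.Set.contains patterns server_name then true
  else prefixLoopB patterns [] server_name.toList

-- ===== PRECONDITION & SPEC =====
def Spec_matches_permission (server_name : String) (allowed_servers : List String) (out : Bool) : Prop := out = matches_permission_alt server_name allowed_servers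
instance (server_name : String) (allowed_servers : List String) (out : Bool) : Decidable (Spec_matches_permission server_name allowed_servers out) := by unfold Spec_matches_permission; infer_instance

-- ===== CLAIM =====
def Claim_equal_matches_permission : Prop := ∀ (server_name : String) (allowed_servers : List String), Dom_matches_permission server_name allowed_servers → Spec_matches_permission server_name allowed_servers (matches_permission server_name allowed_servers)

-- ===== LEMMAS AND PROOFS =====

-- common order-independent form: star, exact, or some '-*' pattern whose stem prefixes the name
def threeway (server_name : String) (l : List String) : Bool :=
  l.contains "*" || l.contains server_name ||
  l.any (fun p => PySem.Str.endswith p "-*" &&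
    PySem.Str.startswith server_name (PySem.Str.slice p none (some (-1))))

-- the [:-1] slice is a list prefix, so a pattern equal to the server name passes its own prefix test
lemma startswith_dropLast (l : List Char) :
    PySem.Chars.startswith l (PySem.List.slice l none (some (-1))) = true := by
  rw [PySem.Chars.startswith_iff, PySem.List.slice_to_neg_one]
  exact List.dropLast_prefix _

lemma loopA_eq_threeway (server_name : String) (allowed_servers : List String) :
    matchesLoopA server_name allowed_servers = threeway server_name allowed_servers := by
  induction allowed_servers with
  | nil => simp [matchesLoopA, threeway]
  | cons p rest ih =>
    by_cases hstar : p = "*"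
    · simp [matchesLoopA, threeway, hstar]
    · by_cases hw : PySem.Chars.endswith p.toList ('-' :: '*' :: []) = true
      · by_cases hs : PySem.Chars.startswith server_name.toList (PySem.List.slice p.toList none (some (-1))) = true
        · simp [matchesLoopA, threeway, hstar, hw, hs]
        · have heq : p ≠ server_name := fun h => hs (h ▸ startswith_dropLast p.toList)
          simp [matchesLoopA, threeway, hstar, hw, hs, ih, Ne.symm hstar, Ne.symm heq]
      · by_cases heq : p = server_name
        · subst heq
          simp [matchesLoopA, threeway, hstar, hw]
        · simp [matchesLoopA, threeway, hstar, hw, ih, heq, Ne.symm hstar, Ne.symm heq]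

lemma prefixLoopB_iff (pats : PySem.Set String) (rest : List Char) :
    ∀ pre, prefixLoopB pats pre rest = true ↔
      ∃ a : List Char, (a ++ ['-']) <+: rest ∧
        PySem.Set.contains pats (String.ofList (pre ++ (a ++ ['-', '*']))) = true := by
  induction rest with
  | nil =>
    intro pre
    simp [prefixLoopB]
  | cons ch rest ih =>
    intro pre
    constructor
    · intro h
      simp only [prefixLoopB] at h
      split_ifs at h with hcond
      · have hch : ch = '-' := by
          rcases Bool.and_eq_true .. |>.mp (by exact_mod_cast hcond) with ⟨h1, _⟩
          exact decide_eq_true_iff.mp h1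
        refine ⟨[], by simp [hch], ?_⟩
        have h2 := (Bool.and_eq_true .. |>.mp (by exact_mod_cast hcond)).2
        subst hch
        simpa using h2
      · rcases (ih (pre ++ [ch])).mp h with ⟨a, hpre, hcon⟩
        exact ⟨ch :: a, by simp [List.cons_prefix_cons, hpre],
               by simpa using hcon⟩
    · rintro ⟨a, hpre, hcon⟩
      simp only [prefixLoopB]
      cases a with
      | nil =>
        have hch : ch = '-' := by
          have h' := hpre; simp at h'; exact h'.symm
        subst hch
        rw [if_pos (by simpa [List.append_assoc] using hcon)]
      | cons c a' =>
        have h1 := List.cons_prefix_cons.mp (by simpa using hpre)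
        have hc : c = ch := h1.1
        subst hc
        split_ifs with hcond
        · rfl
        · exact (ih (pre ++ [c])).mpr ⟨a', h1.2, by simpa using hcon⟩

lemma contains_ofList (l : List String) (x : String) :
    PySem.Set.contains (PySem.Set.ofList l) x = l.contains x := by
  simp [PySem.Set.contains, PySem.Set.mem_ofList]

lemma prefixLoopB_eq_any (server_name : String) (l : List String) :
    prefixLoopB (PySem.Set.ofList l) [] server_name.toList =
      l.any (fun p => PySem.Str.endswith p "-*" &&
        PySem.Str.startswith server_name (PySem.Str.slice p none (some (-1)))) := by
  rw [Bool.eq_iff_iff, prefixLoopB_iff, List.any_eq_true]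
  constructor
  · rintro ⟨a, hpre, hcon⟩
    refine ⟨String.ofList (a ++ ['-', '*']), ?_, ?_⟩
    · have := contains_ofList l (String.ofList (a ++ ['-', '*']))
      rw [List.contains_eq_mem] at this
      exact decide_eq_true_iff.mp (this ▸ (by simpa using hcon))
    · have hends : PySem.Chars.endswith (a ++ ['-', '*']) ['-', '*'] = true := by
        rw [PySem.Chars.endswith_iff]; exact ⟨a, rfl⟩
      have hstarts : PySem.Chars.startswith server_name.toList
          (PySem.List.slice (a ++ ['-', '*']) none (some (-1))) = true := by
        rw [PySem.Chars.startswith_iff, PySem.List.slice_to_neg_one]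
        have : (a ++ ['-', '*']).dropLast = a ++ ['-'] := by
          have : a ++ ['-', '*'] = (a ++ ['-']) ++ ['*'] := by simp
          rw [this, List.dropLast_concat]
        rw [this]; exact hpre
      simpa [String.toList_ofList] using And.intro hends hstarts
  · rintro ⟨p, hmem, hp⟩
    rcases Bool.and_eq_true .. |>.mp (by simpa using hp) with ⟨hends, hstarts⟩
    rw [PySem.Chars.endswith_iff] at hends
    rcases hends with ⟨m, hm⟩
    refine ⟨m, ?_, ?_⟩
    · rw [PySem.Chars.startswith_iff, PySem.List.slice_to_neg_one] at hstarts
      have hdl : p.toList.dropLast = m ++ ['-'] := by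
        rw [← hm]
        have : m ++ ['-', '*'] = (m ++ ['-']) ++ ['*'] := by simp
        rw [this, List.dropLast_concat]
      rwa [hdl] at hstarts
    · have hpeq : String.ofList ([] ++ (m ++ ['-', '*'])) = p := by
        rw [List.nil_append, hm]; exact String.ofList_toList
      rw [hpeq, contains_ofList, List.contains_eq_mem]
      exact decide_eq_true_iff.mpr hmem

lemma alt_eq_threeway (server_name : String) (l : List String) :
    matches_permission_alt server_name l = threeway server_name l := by
  simp only [matches_permission_alt, threeway]
  rw [contains_ofList, contains_ofList, prefixLoopB_eq_any]
  cases h1 : l.contains "*" <;> cases h2 : l.contains server_name <;> simp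

-- ===== VERDICT =====
theorem matches_permission_spec : Claim_equal_matches_permission := by
  intro server_name allowed_servers _
  unfold Spec_matches_permission matches_permission
  rw [loopA_eq_threeway, alt_eq_threeway]
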